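-- pv_equiv track=rewrite | github.com/mengrenman/Polygon.io-data-ingestion-pipeline | legacy_scripts/run_pullers.py | normalize_guess
-- ===== SOURCE A (Python) =====
-- def normalize_guess(tk: str) -> str:
--     """Safe normalization: uppercase; replace / - ^ and spaces with '.'."""
--     t = tk.strip().upper()
--     # Replace common separators with dot (Polygon uses dot for classes)
--     for ch in ("/", "-", "^", " "):
--         t = t.replace(ch, ".")
--     # Collapse consecutive dots (e.g., "ABC..B" -> "ABC.B")
--     while ".." in t:
--         t = t.replace("..", ".")
--     # Strip leading/trailing dots
--     t = t.strip(".")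
--     return t
-- ===== SOURCE B (Python) =====
-- def normalize_guess(tk: str) -> str:
--     """One pass: uppercase, turn separators into dots, collapsing runs; strip edge dots."""
--     t = tk.strip().upper()
--     seps = {"/", "-", "^", " ", "."}
--     out = []
--     prev_dot = False
--     for ch in t:
--         if ch in seps:
--             if not prev_dot:
--                 out.append(".")
--                 prev_dot = True
--         else:
--             out.append(ch)
--             prev_dot = False
--     return "".join(out).strip(".")
-- ===== Notes on version B (the rewrite author's own statement) =====
-- stated objective: simpler
-- what changed: Replaces A's four replace() scans plus the repeated dot-collapsing while-loop by a single left-to-right pass that maps separators to dots and skips a dot when the previously emitted character was already a dot.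
import Mathlib
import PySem

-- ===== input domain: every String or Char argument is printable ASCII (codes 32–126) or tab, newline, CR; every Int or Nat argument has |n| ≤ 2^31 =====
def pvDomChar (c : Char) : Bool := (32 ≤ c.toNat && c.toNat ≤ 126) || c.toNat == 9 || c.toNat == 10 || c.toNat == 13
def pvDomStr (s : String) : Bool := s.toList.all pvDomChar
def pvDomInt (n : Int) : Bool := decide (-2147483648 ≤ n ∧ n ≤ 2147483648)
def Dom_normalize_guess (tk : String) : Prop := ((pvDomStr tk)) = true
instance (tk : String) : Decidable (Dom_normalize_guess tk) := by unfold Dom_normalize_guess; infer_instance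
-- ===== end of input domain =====

-- B replaces A's four replace() scans plus the dot-collapsing while-loop by one
-- left-to-right pass with a previous-was-dot flag (simpler; return values proved equal).

-- ===== PORT A =====

-- repDD is one round of Python's t.replace("..", ".") (leftmost, non-overlapping).
-- It and the next four lemmas are stated before the port because collapseLoop's
-- termination proof cites them.
def repDD : List Char → List Char
  | [] => []
  | [c] => [c]
  | a :: b :: t => if a = '.' ∧ b = '.' then '.' :: repDD t else a :: repDD (b :: t)

theorem repDD_go : ∀ (fuel : Nat) (l acc : List Char), l.length ≤ fuel →
    PySem.Chars.replace.go ['.', '.'] ['.'] fuel l acc = acc.reverse ++ repDD l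
  | 0, l, acc, h => by
      have hl : l = [] := List.eq_nil_of_length_eq_zero (Nat.le_zero.mp h)
      subst hl
      rw [PySem.Chars.replace.go]
      simp [repDD]
  | n + 1, [], acc, _ => by
      rw [PySem.Chars.replace.go] <;> simp [repDD]
  | n + 1, [c], acc, _ => by
      rw [PySem.Chars.replace.go]
      have hpre : List.isPrefixOf ['.', '.'] [c] = false := by
        simp [List.isPrefixOf]
      rw [hpre]
      simp only [Bool.false_eq_true, if_false]
      rw [repDD_go n [] (c :: acc) (by simp)]
      simp [repDD]
  | n + 1, a :: b :: t, acc, h => by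
      rw [PySem.Chars.replace.go]
      by_cases hab : a = '.' ∧ b = '.'
      · obtain ⟨ha, hb⟩ := hab
        subst ha; subst hb
        have hpre : List.isPrefixOf ['.', '.'] ('.' :: '.' :: t) = true := by
          simp [List.isPrefixOf]
        rw [hpre]
        simp only [if_pos]
        rw [repDD_go n (List.drop (['.', '.'] : List Char).length ('.' :: '.' :: t)) _
              (by simp at h ⊢; omega)]
        simp [repDD]
      · have hpre : List.isPrefixOf ['.', '.'] (a :: b :: t) = false := by
          rw [Bool.eq_false_iff]
          intro hT
          have hp := List.isPrefixOf_iff_prefix.mp hT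
          obtain ⟨ha, hp2⟩ := List.cons_prefix_cons.mp hp
          obtain ⟨hb, _⟩ := List.cons_prefix_cons.mp hp2
          exact hab ⟨ha.symm, hb.symm⟩
        rw [hpre]
        simp only [Bool.false_eq_true, if_false]
        rw [repDD_go n (b :: t) (a :: acc) (by simp at h ⊢; omega)]
        simp [repDD, hab]

theorem replace_dotdot (l : List Char) :
    PySem.Chars.replace l ['.', '.'] ['.'] = repDD l := by
  rw [PySem.Chars.replace]
  simp only [List.isEmpty_cons, Bool.false_eq_true, if_false]
  exact repDD_go l.length l [] le_rfl

theorem repDD_length_le : ∀ l : List Char, (repDD l).length ≤ l.length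
  | [] => by simp [repDD]
  | [c] => by simp [repDD]
  | a :: b :: t => by
      by_cases hab : a = '.' ∧ b = '.'
      · have := repDD_length_le t
        simp only [repDD, if_pos hab, List.length_cons]
        omega
      · have := repDD_length_le (b :: t)
        simp only [repDD, if_neg hab, List.length_cons] at this ⊢
        omega

theorem repDD_length_lt : ∀ l : List Char, ['.', '.'] <:+: l → (repDD l).length < l.length
  | [], h => by
      have := h.length_le; simp at this
  | [c], h => by
      have := h.length_le; simp at this
  | a :: b :: t, h => by
      by_cases hab : a = '.' ∧ b = '.'
      · have := repDD_length_le t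
        simp only [repDD, if_pos hab, List.length_cons]
        omega
      · have hnt : ['.', '.'] <:+: b :: t := by
          rcases (List.infix_cons_iff).mp h with hp | hs
          · exfalso
            obtain ⟨ha, hp2⟩ := List.cons_prefix_cons.mp hp
            obtain ⟨hb, _⟩ := List.cons_prefix_cons.mp hp2
            exact hab ⟨ha.symm, hb.symm⟩
          · exact hs
        have := repDD_length_lt (b :: t) hnt
        simp only [repDD, if_neg hab, List.length_cons] at this ⊢
        omega

theorem replace_str_len_lt (t : String) (h : PySem.Str.isIn ".." t = true) :
    (PySem.Str.replace t ".." ".").toList.length < t.toList.length := by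
  have hinf : (("..".toList : List Char)) <:+: t.toList := (PySem.Str.isIn_iff_infix ".." t).mp h
  have h2 : (PySem.Str.replace t ".." ".").toList
      = PySem.Chars.replace t.toList ['.', '.'] ['.'] := by
    simp [PySem.Str.toList_replace]
  rw [h2, replace_dotdot]
  exact repDD_length_lt t.toList hinf

-- while ".." in t: t = t.replace("..", ".")
def collapseLoop (t : String) : String :=
  if h : PySem.Str.isIn ".." t = true then collapseLoop (PySem.Str.replace t ".." ".") else t
termination_by t.toList.length
decreasing_by exact replace_str_len_lt t h

def normalize_guess (tk : String) : String :=
  let t0 := PySem.Str.upper (PySem.Str.strip tk)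
  let t1 := ["/", "-", "^", " "].foldl (fun t ch => PySem.Str.replace t ch ".") t0
  PySem.Str.stripChars (collapseLoop t1) "."

-- ===== PORT B =====
def normalize_guess_alt (tk : String) : String :=
  let t := PySem.Str.upper (PySem.Str.strip tk)
  let res := t.toList.foldl
    (fun (st : List Char × Bool) ch =>
      if ch ∈ ['/', '-', '^', ' ', '.'] then
        if st.2 then st else (st.1 ++ ['.'], true)
      else (st.1 ++ [ch], false))
    ([], false)
  PySem.Str.stripChars (String.ofList res.1) "."

-- ===== PRECONDITION & SPEC =====
def Spec_normalize_guess (tk : String) (out : String) : Prop := out = normalize_guess_alt tk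
instance (tk : String) (out : String) : Decidable (Spec_normalize_guess tk out) := by unfold Spec_normalize_guess; infer_instance

-- ===== CLAIM (what is proved, stated in full; the proofs are below) =====
def Claim_equal_normalize_guess : Prop := ∀ (tk : String), Dom_normalize_guess tk → Spec_normalize_guess tk (normalize_guess tk)

-- ===== LEMMAS AND PROOFS =====

-- collapse l = l with every run of consecutive dots shortened to one dot.
def collapse : List Char → List Char
  | [] => []
  | [c] => [c]
  | a :: b :: t => if a = '.' ∧ b = '.' then collapse (b :: t) else a :: collapse (b :: t)

theorem collapse_dot_dot (t : List Char) : collapse ('.' :: '.' :: t) = collapse ('.' :: t) := by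
  simp [collapse]

theorem collapse_cons_ne {a : Char} (h : a ≠ '.') (x : List Char) :
    collapse (a :: x) = a :: collapse x := by
  cases x <;> simp [collapse, h]

theorem collapse_dot_cons_ne {b : Char} (h : b ≠ '.') (t : List Char) :
    collapse ('.' :: b :: t) = '.' :: collapse (b :: t) := by
  simp [collapse, h]

theorem collapse_dot_dropWhile : ∀ x : List Char,
    collapse ('.' :: x) = '.' :: collapse (x.dropWhile (fun c => c == '.'))
  | [] => by simp [collapse]
  | c :: u => by
      by_cases hc : c = '.'
      · subst hc
        rw [collapse_dot_dot, collapse_dot_dropWhile u,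
            List.dropWhile_cons_of_pos (by simp)]
      · rw [collapse_dot_cons_ne hc, List.dropWhile_cons_of_neg (by simp [hc])]

theorem dropWhile_repDD : ∀ l : List Char,
    (repDD l).dropWhile (fun c => c == '.') = repDD (l.dropWhile (fun c => c == '.'))
  | [] => by simp [repDD]
  | [c] => by
      by_cases hc : c = '.'
      · subst hc; decide
      · have h1 : List.dropWhile (fun x => x == '.') [c] = [c] :=
          List.dropWhile_cons_of_neg (by simp [hc])
        simp [repDD, h1]
  | a :: b :: t => by
      by_cases hab : a = '.' ∧ b = '.'
      · obtain ⟨ha, hb⟩ := hab; subst ha; subst hb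
        simp only [repDD, and_self, if_pos]
        rw [List.dropWhile_cons_of_pos (by simp), List.dropWhile_cons_of_pos (by simp),
            List.dropWhile_cons_of_pos (by simp)]
        exact dropWhile_repDD t
      · have hrep : repDD (a :: b :: t) = a :: repDD (b :: t) := by simp [repDD, hab]
        rw [hrep]
        by_cases ha : a = '.'
        · subst ha
          have hb : b ≠ '.' := fun hb => hab ⟨rfl, hb⟩
          have hbt : repDD (b :: t) = b :: repDD t := by cases t <;> simp [repDD, hb]
          rw [hbt, List.dropWhile_cons_of_pos (by simp),
              List.dropWhile_cons_of_neg (by simp [hb]),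
              List.dropWhile_cons_of_pos (by simp),
              List.dropWhile_cons_of_neg (by simp [hb]), hbt]
        · rw [List.dropWhile_cons_of_neg (by simp [ha]),
              List.dropWhile_cons_of_neg (by simp [ha]), hrep]

theorem collapse_repDD : ∀ l : List Char, collapse (repDD l) = collapse l
  | [] => by simp [repDD]
  | [c] => by simp [repDD]
  | a :: b :: t => by
      by_cases hab : a = '.' ∧ b = '.'
      · obtain ⟨ha, hb⟩ := hab; subst ha; subst hb
        simp only [repDD, and_self, if_pos]
        rw [collapse_dot_dropWhile (repDD t), dropWhile_repDD t, collapse_dot_dot,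
            collapse_dot_dropWhile t,
            collapse_repDD (t.dropWhile (fun c => c == '.'))]
      · have hrep : repDD (a :: b :: t) = a :: repDD (b :: t) := by simp [repDD, hab]
        rw [hrep]
        by_cases ha : a = '.'
        · subst ha
          have hb : b ≠ '.' := fun hb => hab ⟨rfl, hb⟩
          rw [collapse_dot_dropWhile (repDD (b :: t)), dropWhile_repDD (b :: t),
              List.dropWhile_cons_of_neg (by simp [hb]),
              collapse_dot_cons_ne hb, collapse_repDD (b :: t)]
        · rw [collapse_cons_ne ha, collapse_cons_ne ha, collapse_repDD (b :: t)]
termination_by l => l.length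
decreasing_by
  · have := List.length_dropWhile_le (fun c => c == '.') t
    simp at this ⊢; omega
  · simp
  · simp

theorem collapse_of_no_dotdot : ∀ l : List Char, ¬ (['.', '.'] <:+: l) → collapse l = l
  | [], _ => rfl
  | [c], _ => rfl
  | a :: b :: t, h => by
      have hab : ¬ (a = '.' ∧ b = '.') := by
        rintro ⟨ha, hb⟩; subst ha; subst hb
        exact h (List.IsPrefix.isInfix ⟨t, rfl⟩)
      have hnt : ¬ (['.', '.'] <:+: b :: t) := fun hi =>
        h ((List.infix_cons_iff).mpr (Or.inr hi))
      have hcol : collapse (a :: b :: t) = a :: collapse (b :: t) := by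
        simp [collapse, hab]
      rw [hcol, collapse_of_no_dotdot (b :: t) hnt]

theorem collapseLoop_toList (t : String) : (collapseLoop t).toList = collapse t.toList := by
  rw [collapseLoop]
  by_cases h : PySem.Str.isIn ".." t = true
  · rw [dif_pos h]
    rw [collapseLoop_toList (PySem.Str.replace t ".." ".")]
    have h2 : (PySem.Str.replace t ".." ".").toList
        = PySem.Chars.replace t.toList ['.', '.'] ['.'] := by
      simp [PySem.Str.toList_replace]
    rw [h2, replace_dotdot, collapse_repDD]
  · rw [dif_neg h]
    have hni : ¬ (['.', '.'] <:+: t.toList) := fun hi =>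
      h ((PySem.Str.isIn_iff_infix ".." t).mpr hi)
    exact (collapse_of_no_dotdot t.toList hni).symm
termination_by t.toList.length
decreasing_by exact replace_str_len_lt t h

-- single-character replace is a map
theorem repSingle_go (c0 : Char) : ∀ (fuel : Nat) (l acc : List Char), l.length ≤ fuel →
    PySem.Chars.replace.go [c0] ['.'] fuel l acc
      = acc.reverse ++ l.map (fun x => if x = c0 then '.' else x)
  | 0, l, acc, h => by
      have hl : l = [] := List.eq_nil_of_length_eq_zero (Nat.le_zero.mp h)
      subst hl
      rw [PySem.Chars.replace.go]
      simp
  | n + 1, [], acc, _ => by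
      rw [PySem.Chars.replace.go] <;> simp
  | n + 1, c :: t, acc, h => by
      rw [PySem.Chars.replace.go]
      by_cases hc : c = c0
      · subst hc
        have hpre : List.isPrefixOf [c] (c :: t) = true := by
          simp [List.isPrefixOf]
        rw [hpre]
        simp only [if_pos]
        rw [repSingle_go c n (List.drop ([c] : List Char).length (c :: t)) _
              (by simp at h ⊢; omega)]
        simp
      · have hpre : List.isPrefixOf [c0] (c :: t) = false := by
          simp [List.isPrefixOf]
          intro h'; exact absurd h'.symm hc
        rw [hpre]
        simp only [Bool.false_eq_true, if_false]
        rw [repSingle_go c0 n t (c :: acc) (by simp at h ⊢; omega)]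
        simp [hc]

theorem replace_single (l : List Char) (c0 : Char) :
    PySem.Chars.replace l [c0] ['.'] = l.map (fun x => if x = c0 then '.' else x) := by
  rw [PySem.Chars.replace]
  simp only [List.isEmpty_cons, Bool.false_eq_true, if_false]
  exact repSingle_go c0 l.length l [] le_rfl

-- the function A's four replaces compose to
def sepToDot (c : Char) : Char := if c ∈ (['/', '-', '^', ' '] : List Char) then '.' else c

theorem sepToDot_comp (c : Char) :
    (if (if (if (if c = '/' then '.' else c) = '-' then '.'
        else (if c = '/' then '.' else c)) = '^' then '.'
        else (if (if c = '/' then '.' else c) = '-' then '.'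
        else (if c = '/' then '.' else c))) = ' ' then '.'
        else (if (if (if c = '/' then '.' else c) = '-' then '.'
        else (if c = '/' then '.' else c)) = '^' then '.'
        else (if (if c = '/' then '.' else c) = '-' then '.'
        else (if c = '/' then '.' else c)))) = sepToDot c := by
  by_cases h1 : c = '/'
  · subst h1; decide
  by_cases h2 : c = '-'
  · subst h2; decide
  by_cases h3 : c = '^'
  · subst h3; decide
  by_cases h4 : c = ' '
  · subst h4; decide
  simp [sepToDot, h1, h2, h3, h4]

theorem foldl_replaces_toList (t0 : String) :
    (["/", "-", "^", " "].foldl (fun t ch => PySem.Str.replace t ch ".") t0).toList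
      = t0.toList.map sepToDot := by
  have hstep : ∀ (s : String) (ch : String) (c0 : Char), ch.toList = [c0] →
      (PySem.Str.replace s ch ".").toList
        = s.toList.map (fun x => if x = c0 then '.' else x) := by
    intro s ch c0 hch
    have h2 : (PySem.Str.replace s ch ".").toList
        = PySem.Chars.replace s.toList ch.toList (".".toList) := by
      simp [PySem.Str.toList_replace]
    rw [h2, hch]
    exact replace_single s.toList c0
  simp only [List.foldl_cons, List.foldl_nil]
  rw [hstep _ " " ' ' rfl, hstep _ "^" '^' rfl, hstep _ "-" '-' rfl, hstep _ "/" '/' rfl]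
  simp only [List.map_map]
  exact List.map_congr_left (fun c _ => sepToDot_comp c)

-- B's loop body as structural recursion
def altGo : Bool → List Char → List Char
  | _, [] => []
  | prev, c :: t =>
      if c ∈ (['/', '-', '^', ' ', '.'] : List Char) then
        if prev then altGo true t else '.' :: altGo true t
      else c :: altGo false t

theorem foldB : ∀ (l acc : List Char) (prev : Bool),
    (l.foldl (fun (st : List Char × Bool) ch =>
        if ch ∈ (['/', '-', '^', ' ', '.'] : List Char) then
          if st.2 then st else (st.1 ++ ['.'], true)
        else (st.1 ++ [ch], false)) (acc, prev)).1 = acc ++ altGo prev l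
  | [], acc, prev => by simp [altGo]
  | c :: t, acc, prev => by
      simp only [List.foldl_cons]
      by_cases hc : c ∈ (['/', '-', '^', ' ', '.'] : List Char)
      · rw [if_pos hc]
        cases prev
        · simp only [Bool.false_eq_true, if_false]
          rw [foldB t (acc ++ ['.']) true]
          simp [altGo, hc]
        · simp only [if_pos]
          rw [foldB t acc true]
          simp [altGo, hc]
      · rw [if_neg hc]
        rw [foldB t (acc ++ [c]) false]
        simp [altGo, hc]

theorem mem_seps_iff_sepToDot (c : Char) :
    c ∈ (['/', '-', '^', ' ', '.'] : List Char) ↔ sepToDot c = '.' := by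
  by_cases hm : c ∈ (['/', '-', '^', ' '] : List Char)
  · simp only [sepToDot, if_pos hm]
    simp at hm ⊢
    tauto
  · simp only [sepToDot, if_neg hm]
    simp at hm ⊢
    tauto

theorem altGo_collapse : ∀ l : List Char,
    altGo false l = collapse (l.map sepToDot)
      ∧ '.' :: altGo true l = collapse ('.' :: l.map sepToDot)
  | [] => by simp [altGo, collapse]
  | c :: t => by
      obtain ⟨ihF, ihT⟩ := altGo_collapse t
      by_cases hc : c ∈ (['/', '-', '^', ' ', '.'] : List Char)
      · have hs : sepToDot c = '.' := (mem_seps_iff_sepToDot c).mp hc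
        refine ⟨?_, ?_⟩
        · simp only [altGo, if_pos hc, Bool.false_eq_true, if_false]
          rw [List.map_cons, hs]
          exact ihT
        · simp only [altGo, if_pos hc, if_true]
          rw [List.map_cons, hs, collapse_dot_dot]
          exact ihT
      · have hcd : c ≠ '.' := fun h => hc (by simp [h])
        have hs : sepToDot c = c := by
          simp only [sepToDot, ite_eq_right_iff]
          intro h; exact absurd (by simpa using h) (fun hm => hc (by simp at hm ⊢; tauto))
        refine ⟨?_, ?_⟩
        · simp only [altGo, if_neg hc]
          rw [List.map_cons, hs, collapse_cons_ne hcd, ihF]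
        · simp only [altGo, if_neg hc]
          rw [List.map_cons, hs, collapse_dot_cons_ne hcd, collapse_cons_ne hcd, ihF]

-- ===== VERDICT (by name: the statement is the Claim_ definition above) =====
set_option maxHeartbeats 1000000 in
theorem normalize_guess_spec : Claim_equal_normalize_guess := by
  intro tk _
  unfold Spec_normalize_guess
  simp only [normalize_guess, normalize_guess_alt]
  refine congrArg (fun s => PySem.Str.stripChars s ".") ?_
  apply String.toList_inj.mp
  rw [collapseLoop_toList, foldl_replaces_toList]
  rw [String.toList_ofList, foldB _ [] false]
  simp only [List.nil_append]
  exact ((altGo_collapse _).1).symm
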